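-- pv_equiv track=rewrite | github.com/abhishek-asarawa/random | Monthly_Test_1.py | count_damage
-- ===== SOURCE A (Python) =====
-- def count_damage(s):
--   n=len(s)
--   charge=1
--   damage=0
--   for i in range(n):
--     if s[i]=="C":
--       charge*=2
--     if s[i]=="S":
--       damage+=charge
--   return damage
-- ===== SOURCE B (Python) =====
-- def count_damage(s):
--   return sum(seg.count("S") * 2 ** i for i, seg in enumerate(s.split("C")))
-- ===== Notes on version B (the rewrite author's own statement) =====
-- stated objective: simpler
-- what changed: Replaces the per-character charge/damage state machine (charge doubled at each 'C', accumulated at each 'S') by splitting the string on 'C' and summing seg.count('S') * 2**i over the segments, since the charge inside segment i is exactly 2**i; the splitting and counting run in C-level string methods instead of a Python loop.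
import Mathlib
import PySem

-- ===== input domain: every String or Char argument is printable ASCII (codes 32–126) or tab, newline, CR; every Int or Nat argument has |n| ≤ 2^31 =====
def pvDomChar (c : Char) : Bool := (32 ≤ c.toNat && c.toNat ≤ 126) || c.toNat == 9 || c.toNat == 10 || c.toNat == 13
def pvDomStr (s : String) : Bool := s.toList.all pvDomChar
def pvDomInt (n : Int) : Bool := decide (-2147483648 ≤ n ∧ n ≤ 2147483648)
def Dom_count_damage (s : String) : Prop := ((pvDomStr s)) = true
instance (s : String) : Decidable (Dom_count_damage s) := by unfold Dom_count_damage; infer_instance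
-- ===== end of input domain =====

-- B replaces A's per-character charge/damage state machine by split-on-'C' plus a
-- weighted per-segment count (charge in segment i is 2^i); objective: simpler.

-- ===== PORT A =====
def count_damage (s : String) : Int :=
  let n : Int := PySem.Str.len s
  let st := (PySem.List.pyRange 0 n).foldl
    (fun (st : Int × Int) i =>
      let c := PySem.List.pyGetD s.toList i ' '
      let st1 := if c == 'C' then (st.1 * 2, st.2) else st
      if c == 'S' then (st1.1, st1.2 + st1.1) else st1) (1, 0)
  st.2

-- ===== PORT B =====
def count_damage_alt (s : String) : Int :=
  ((PySem.List.enumerate (PySem.Chars.splitOn s.toList ['C']) 0).map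
    (fun p => (PySem.Chars.count p.2 ['S'] : Int) * 2 ^ p.1.toNat)).sum

-- ===== PRECONDITION & SPEC =====
def Spec_count_damage (s : String) (out : Int) : Prop := out = count_damage_alt s
instance (s : String) (out : Int) : Decidable (Spec_count_damage s out) := by unfold Spec_count_damage; infer_instance

-- ===== CLAIM (what is proved, stated in full; the proofs are below) =====
def Claim_equal_count_damage : Prop := ∀ (s : String), Dom_count_damage s → Spec_count_damage s (count_damage s)

-- ===== LEMMAS AND PROOFS =====

/-- The value both programs compute, as a clean structural recursion. -/
def pvDmg : List Char → Int
  | [] => 0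
  | c :: t => if c = 'C' then 2 * pvDmg t else if c = 'S' then 1 + pvDmg t else pvDmg t

/-- Clean accumulator-form of `Chars.splitOn` on separator `['C']`. -/
def pvSplit : List Char → List Char → List (List Char)
  | [], cur => [cur.reverse]
  | c :: t, cur => if c = 'C' then cur.reverse :: pvSplit t [] else pvSplit t (c :: cur)

/-- Weighted segment sum: segment i weighted 2^i. -/
def pvW : List (List Char) → Int
  | [] => 0
  | seg :: rest => (seg.count 'S' : Int) + 2 * pvW rest

lemma pvCount_go (l : List Char) : ∀ (fuel : Nat) (acc : Nat), l.length ≤ fuel →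
    PySem.Chars.count.go ['S'] fuel l acc = acc + l.count 'S' := by
  induction l with
  | nil => intro fuel acc _; cases fuel <;> simp [PySem.Chars.count.go]
  | cons c t ih =>
    intro fuel acc h
    cases fuel with
    | zero => simp at h
    | succ fuel =>
      simp only [PySem.Chars.count.go]
      by_cases hc : c = 'S'
      · subst hc
        simp only [List.isPrefixOf, Bool.and_true, beq_self_eq_true, if_pos]
        rw [show List.drop (['S'].length) ('S' :: t) = t from rfl]
        rw [ih fuel (acc + 1) (by simpa using Nat.le_of_succ_le_succ h)]
        simp; omega
      · have hpre : (['S'].isPrefixOf (c :: t)) = false := by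
          simp [List.isPrefixOf]; exact fun h' => hc h'.symm
        rw [hpre]
        simp only [Bool.false_eq_true, if_false]
        rw [ih fuel acc (by simpa using Nat.le_of_succ_le_succ h)]
        simp [hc]

lemma pvCount_S (l : List Char) : PySem.Chars.count l ['S'] = l.count 'S' := by
  simp [PySem.Chars.count, pvCount_go l l.length 0 le_rfl]

lemma pvSplit_go (l : List Char) : ∀ (fuel : Nat) (cur : List Char) (acc : List (List Char)),
    l.length ≤ fuel →
    PySem.Chars.splitOn.go ['C'] fuel l cur acc = acc.reverse ++ pvSplit l cur := by
  induction l with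
  | nil => intro fuel cur acc _; cases fuel <;> simp [PySem.Chars.splitOn.go, pvSplit]
  | cons c t ih =>
    intro fuel cur acc h
    cases fuel with
    | zero => simp at h
    | succ fuel =>
      simp only [PySem.Chars.splitOn.go]
      by_cases hc : c = 'C'
      · subst hc
        simp only [List.isPrefixOf, Bool.and_true, beq_self_eq_true, if_pos]
        rw [show List.drop (['C'].length) ('C' :: t) = t from rfl]
        rw [ih fuel [] (cur.reverse :: acc) (by simpa using Nat.le_of_succ_le_succ h)]
        simp [pvSplit]
      · have hpre : (['C'].isPrefixOf (c :: t)) = false := by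
          simp [List.isPrefixOf]; exact fun h' => hc h'.symm
        rw [hpre]
        simp only [Bool.false_eq_true, if_false]
        rw [ih fuel (c :: cur) acc (by simpa using Nat.le_of_succ_le_succ h)]
        simp [pvSplit, hc]

lemma pvSplit_eq (l : List Char) : PySem.Chars.splitOn l ['C'] = pvSplit l [] := by
  simp [PySem.Chars.splitOn, pvSplit_go l (l.length + 1) [] [] (by omega)]

lemma pvW_split (l : List Char) : ∀ (cur : List Char),
    pvW (pvSplit l cur) = (cur.count 'S' : Int) + pvDmg l := by
  induction l with
  | nil => intro cur; simp [pvSplit, pvW, pvDmg]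
  | cons c t ih =>
    intro cur
    by_cases hc : c = 'C'
    · subst hc; simp [pvSplit, pvW, pvDmg, ih]
    · by_cases hs : c = 'S'
      · subst hs
        simp only [pvSplit, if_neg (by decide : ¬ ('S' = 'C'))]
        rw [ih]
        simp [pvDmg]
        ring
      · simp only [pvSplit, if_neg hc]
        rw [ih]
        simp [pvDmg, hc, hs]

lemma pvEnum_sum (segs : List (List Char)) : ∀ (k : Nat),
    ((PySem.List.enumerate segs (k : Int)).map
      (fun p => (PySem.Chars.count p.2 ['S'] : Int) * 2 ^ p.1.toNat)).sum
      = 2 ^ k * pvW segs := by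
  induction segs with
  | nil => intro k; simp [PySem.List.enumerate, pvW]
  | cons seg rest ih =>
    intro k
    rw [PySem.List.enumerate_cons]
    have hcast : ((k : Int) + 1) = ((k + 1 : Nat) : Int) := by push_cast; ring
    rw [List.map_cons, List.sum_cons, hcast, ih (k + 1)]
    simp [pvW, pvCount_S, pow_succ]
    ring

lemma pvFold (l : List Char) : ∀ (ch dm : Int),
    (l.foldl (fun (st : Int × Int) c =>
      let st1 := if c == 'C' then (st.1 * 2, st.2) else st
      if c == 'S' then (st1.1, st1.2 + st1.1) else st1) (ch, dm)).2
      = dm + ch * pvDmg l := by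
  induction l with
  | nil => intro ch dm; simp [pvDmg]
  | cons c t ih =>
    intro ch dm
    simp only [List.foldl_cons]
    by_cases hc : c = 'C'
    · subst hc
      simp only [show (('C' : Char) == 'C') = true from rfl,
        show (('C' : Char) == 'S') = false from rfl, if_true, Bool.false_eq_true, if_false]
      rw [ih]
      simp [pvDmg]; ring
    · by_cases hs : c = 'S'
      · subst hs
        simp only [show (('S' : Char) == 'C') = false from rfl,
          show (('S' : Char) == 'S') = true from rfl, if_true, Bool.false_eq_true, if_false]
        rw [ih]
        simp [pvDmg]; ring
      · have hC : (c == 'C') = false := by simp [hc]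
        have hS : (c == 'S') = false := by simp [hs]
        simp only [hC, hS, Bool.false_eq_true, if_false]
        rw [ih]
        simp [pvDmg, hc, hs]

-- ===== VERDICT (by name: the statement is the Claim_ definition above) =====
theorem count_damage_spec : Claim_equal_count_damage := by
  intro s _
  show count_damage s = count_damage_alt s
  have hA : count_damage s =
      (s.toList.foldl
        (fun (st : Int × Int) c =>
          let st1 := if c == 'C' then (st.1 * 2, st.2) else st
          if c == 'S' then (st1.1, st1.2 + st1.1) else st1) (1, 0)).2 :=
    congrArg Prod.snd (PySem.List.foldl_pyRange_pyGetD (xs := s.toList) (d := ' ')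
      (f := fun (st : Int × Int) c =>
        let st1 := if c == 'C' then (st.1 * 2, st.2) else st
        if c == 'S' then (st1.1, st1.2 + st1.1) else st1)
      (init := ((1 : Int), (0 : Int))) (a := 0) le_rfl)
  rw [hA, pvFold s.toList 1 0]
  unfold count_damage_alt
  rw [pvSplit_eq]
  have hB := pvEnum_sum (pvSplit s.toList []) 0
  simp only [Nat.cast_zero] at hB
  rw [hB, pow_zero, one_mul, pvW_split s.toList []]
  simp
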